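-- pv_equiv track=rewrite | github.com/amonadam/QSP | src/crypto_lattice/signer.py | aggregate_responses
-- ===== SOURCE A (Python) =====
-- def aggregate_responses(z_shares):
--     """
--     聚合响应
--     使用直接加法，确保与验证阶段的处理方式一致。
--     """
--     if not z_shares: return None
--     L = len(z_shares[0])
--     N = len(z_shares[0][0])
--     z_sum = [[0]*N for _ in range(L)]
--     for z_share in z_shares:
--         for l in range(L):
--             # 直接计算差值，不使用 poly_add（避免标准取模）
--             for i in range(N):
--                 z_sum[l][i] += z_share[l][i]
--     return z_sum
-- ===== SOURCE B (Python) =====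
-- def aggregate_responses(z_shares):
--     if not z_shares:
--         return None
--     L, N = len(z_shares[0]), len(z_shares[0][0])
--
--     def leaf(s):
--         return [[s[l][i] for i in range(N)] for l in range(L)]
--
--     def madd(a, b):
--         return [[a[l][i] + b[l][i] for i in range(N)] for l in range(L)]
--
--     def agg(ss):
--         if len(ss) == 1:
--             return leaf(ss[0])
--         m = len(ss) // 2
--         return madd(agg(ss[:m]), agg(ss[m:]))
--
--     return agg(z_shares)
-- ===== Notes on version B (the rewrite author's own statement) =====
-- stated objective: alternative
-- what changed: Balanced divide-and-conquer: the share list is split in halves, each half aggregated recursively, and the two partial results combined by pairwise L×N matrix addition, replacing A's linear share-major accumulation into a zeroed, mutated grid.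
import Mathlib
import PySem

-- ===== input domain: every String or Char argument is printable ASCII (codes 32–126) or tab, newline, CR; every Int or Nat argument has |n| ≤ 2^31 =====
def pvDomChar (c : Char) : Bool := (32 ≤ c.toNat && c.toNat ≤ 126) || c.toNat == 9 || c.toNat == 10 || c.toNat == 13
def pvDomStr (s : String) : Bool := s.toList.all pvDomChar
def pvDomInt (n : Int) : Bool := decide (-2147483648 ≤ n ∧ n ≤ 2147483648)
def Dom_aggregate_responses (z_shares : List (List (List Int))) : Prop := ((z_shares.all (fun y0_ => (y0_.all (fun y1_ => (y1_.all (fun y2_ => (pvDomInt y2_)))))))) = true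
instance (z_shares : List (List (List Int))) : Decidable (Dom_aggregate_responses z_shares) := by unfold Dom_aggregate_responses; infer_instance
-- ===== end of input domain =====

-- B replaces A's linear share-major accumulation into a zeroed mutated L×N grid by a
-- balanced divide-and-conquer reduction: split the share list in halves, aggregate each
-- half recursively, combine with pairwise matrix addition (alternative; same cost).

-- ===== PORT A =====
def aggregate_responses (z_shares : List (List (List Int))) : Option (List (List Int)) :=
  match z_shares with
  | [] => none
  | first :: _ =>
    let L : Nat := first.length
    let N : Nat := (first.headD []).length
    let init : List (List Int) := List.replicate L (List.replicate N (0 : Int))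
    some (z_shares.foldl (fun z_sum z_share =>
      (List.range L).foldl (fun z_sum l =>
        (List.range N).foldl (fun z_sum i =>
          z_sum.set l ((z_sum.getD l []).set i
            ((z_sum.getD l []).getD i 0 + (z_share.getD l []).getD i 0))) z_sum) z_sum) init)

-- ===== PORT B =====
-- leaf: copy one share, trimmed/read at the L×N window
def pvLeaf (L N : Nat) (s : List (List Int)) : List (List Int) :=
  (List.range L).map (fun l => (List.range N).map (fun i => (s.getD l []).getD i 0))

-- madd: pairwise addition of two L×N matrices
def pvMadd (L N : Nat) (a b : List (List Int)) : List (List Int) :=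
  (List.range L).map (fun l => (List.range N).map (fun i =>
    (a.getD l []).getD i 0 + (b.getD l []).getD i 0))

-- agg: balanced divide-and-conquer over the list of shares (never called on [])
def pvAgg (L N : Nat) (ss : List (List (List Int))) : List (List Int) :=
  match ss with
  | [] => []
  | [s] => pvLeaf L N s
  | a :: b :: rest =>
    let m := (a :: b :: rest).length / 2
    pvMadd L N (pvAgg L N ((a :: b :: rest).take m)) (pvAgg L N ((a :: b :: rest).drop m))
termination_by ss.length
decreasing_by
  · simp [List.length_take]; omega
  · simp [List.length_drop]; omega

def aggregate_responses_alt (z_shares : List (List (List Int))) : Option (List (List Int)) :=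
  match z_shares with
  | [] => none
  | first :: _ =>
    some (pvAgg first.length (first.headD []).length z_shares)

-- ===== PRECONDITION & SPEC =====
-- Pre_ is exactly the set of inputs on which A returns normally: no shares at all, or a
-- nonempty first polynomial list with either N = len(z_shares[0][0]) = 0 (the coefficient
-- loop is empty, so no share is ever indexed) or every share offering at least
-- L = len(z_shares[0]) polynomials of at least N coefficients each
-- (on anything narrower both A and B raise IndexError).
def Pre_aggregate_responses (z_shares : List (List (List Int))) : Prop :=
  z_shares = [] ∨ ((z_shares.headD []) ≠ [] ∧
    (((z_shares.headD []).headD []).length = 0 ∨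
      ∀ s ∈ z_shares, (z_shares.headD []).length ≤ s.length ∧
        ∀ l : Nat, l < (z_shares.headD []).length →
          ((z_shares.headD []).headD []).length ≤ (s.getD l []).length))
instance (z_shares : List (List (List Int))) : Decidable (Pre_aggregate_responses z_shares) := by
  unfold Pre_aggregate_responses; infer_instance

def pvWitness_aggregate_responses : List (List (List Int)) :=
  [[[1, 2], [3, 4]], [[5, 6], [7, 8]]]

def Spec_aggregate_responses (z_shares : List (List (List Int))) (out : Option (List (List Int))) : Prop := out = aggregate_responses_alt z_shares
instance (z_shares : List (List (List Int))) (out : Option (List (List Int))) : Decidable (Spec_aggregate_responses z_shares out) := by unfold Spec_aggregate_responses; infer_instance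

-- ===== CLAIM (what is proved, stated in full; the proofs are below) =====
def Claim_equal_aggregate_responses : Prop := ∀ (z_shares : List (List (List Int))), Dom_aggregate_responses z_shares → Pre_aggregate_responses z_shares → Spec_aggregate_responses z_shares (aggregate_responses z_shares)

-- ===== LEMMAS AND PROOFS =====

-- the running sum at polynomial l, coefficient i over a list of shares
def psum (l i : Nat) (ss : List (List (List Int))) : Int :=
  ss.foldl (fun a s => a + ((s.getD l []).getD i 0)) 0

theorem psum_cons_aux (l i : Nat) (ss : List (List (List Int))) :
    ∀ c : Int, ss.foldl (fun a s => a + ((s.getD l []).getD i 0)) c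
      = c + ss.foldl (fun a s => a + ((s.getD l []).getD i 0)) 0 := by
  induction ss with
  | nil => intro c; simp
  | cons s ss ih =>
    intro c
    simp only [List.foldl_cons]
    rw [ih, ih ((0:Int) + _)]
    ring

theorem psum_cons (l i : Nat) (s : List (List Int)) (ss : List (List (List Int))) :
    psum l i (s :: ss) = ((s.getD l []).getD i 0) + psum l i ss := by
  simp only [psum, List.foldl_cons]
  rw [psum_cons_aux]
  ring

theorem psum_append (l i : Nat) (xs ys : List (List (List Int))) :
    psum l i (xs ++ ys) = psum l i xs + psum l i ys := by
  simp only [psum, List.foldl_append]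
  rw [psum_cons_aux]

theorem getD_map_range {α : Type} (n l : Nat) (f : Nat → α) (d : α) (h : l < n) :
    ((List.range n).map f).getD l d = f l := by
  rw [List.getD_eq_getElem _ _ (by simp [h])]
  simp

theorem madd_maps (L N : Nat) (f g : Nat → Nat → Int) :
    pvMadd L N ((List.range L).map (fun l => (List.range N).map (fun i => f l i)))
               ((List.range L).map (fun l => (List.range N).map (fun i => g l i)))
      = (List.range L).map (fun l => (List.range N).map (fun i => f l i + g l i)) := by
  simp only [pvMadd]
  apply List.map_congr_left
  intro l hl
  rw [List.mem_range] at hl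
  apply List.map_congr_left
  intro i hi
  rw [List.mem_range] at hi
  rw [getD_map_range _ _ _ _ hl, getD_map_range _ _ _ _ hl,
      getD_map_range _ _ _ _ hi, getD_map_range _ _ _ _ hi]

-- closed form for B's divide-and-conquer reduction
theorem pvAgg_closed (L N : Nat) (ss : List (List (List Int))) (h : ss ≠ []) :
    pvAgg L N ss
      = (List.range L).map (fun l => (List.range N).map (fun i => psum l i ss)) := by
  fun_induction pvAgg L N ss with
  | case1 => exact absurd rfl h
  | case2 s =>
    simp only [pvLeaf]
    congr 1; funext l; congr 1; funext i
    rw [psum_cons]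
    simp [psum]
  | case3 a b rest m ih1 ih2 =>
    have hm : m = (a :: b :: rest).length / 2 := rfl
    have hne1 : (a :: b :: rest).take m ≠ [] := by
      intro hc; have := congrArg List.length hc
      simp only [List.length_take, List.length_nil] at this
      simp only [hm, List.length_cons] at this ⊢; omega
    have hne2 : (a :: b :: rest).drop m ≠ [] := by
      intro hc; have := congrArg List.length hc
      simp only [List.length_drop, List.length_nil] at this
      simp only [hm, List.length_cons] at this ⊢; omega
    rw [ih1 hne1, ih2 hne2, madd_maps]
    congr 1; funext l; congr 1; funext i
    rw [← psum_append, List.take_append_drop]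

theorem getD_set_self {α : Type} (z : List α) (l : Nat) (v d : α) (h : l < z.length) :
    (z.set l v).getD l d = v := by
  rw [List.getD_eq_getElem _ _ (by simpa using h)]
  simp [List.getElem_set_self]

theorem getD_set_ne {α : Type} (z : List α) (l j : Nat) (v d : α) (h : j ≠ l) :
    (z.set l v).getD j d = z.getD j d := by
  by_cases hj : j < z.length
  · rw [List.getD_eq_getElem _ _ (by simpa using hj), List.getD_eq_getElem _ _ hj]
    exact List.getElem_set_ne (show l ≠ j by omega) _
  · rw [List.getD_eq_default _ _ (by simp; omega), List.getD_eq_default _ _ (by omega)]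

theorem set_getD_self {α : Type} (z : List α) (l : Nat) (d : α) (h : l < z.length) :
    z.set l (z.getD l d) = z := by
  rw [List.getD_eq_getElem _ _ h]
  exact List.set_getElem_self h

-- factor a fold that only rewrites slot l out of the outer list
theorem foldl_set_factor {α : Type} (l : Nat) (G : List α → Nat → List α) :
    ∀ (is : List Nat) (z : List (List α)), l < z.length →
      is.foldl (fun z i => z.set l (G (z.getD l []) i)) z
        = z.set l (is.foldl G (z.getD l [])) := by
  intro is
  induction is with
  | nil => intro z h; exact (set_getD_self z l [] h).symm
  | cons i is ih =>
    intro z h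
    simp only [List.foldl_cons]
    rw [ih _ (by simpa using h), getD_set_self _ _ _ _ h, List.set_set]

-- pointwise description of the inner coefficient loop
theorem rowStep_spec (q : List Int) :
    ∀ (m : Nat) (r : List Int), m ≤ r.length →
      (((List.range m).foldl (fun r i => r.set i (r.getD i 0 + q.getD i 0)) r).length = r.length) ∧
      (∀ j : Nat, ((List.range m).foldl (fun r i => r.set i (r.getD i 0 + q.getD i 0)) r).getD j 0
        = if j < m then r.getD j 0 + q.getD j 0 else r.getD j 0) := by
  intro m
  induction m with
  | zero => intro r _; simp
  | succ m ih =>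
    intro r hm
    have hm' : m ≤ r.length := by omega
    obtain ⟨hlen, hget⟩ := ih r hm'
    rw [List.range_succ, List.foldl_append]
    simp only [List.foldl_cons, List.foldl_nil]
    constructor
    · rw [List.length_set]; exact hlen
    · intro j
      by_cases hj : j = m
      · subst hj
        rw [getD_set_self _ _ _ _ (by rw [hlen]; omega), hget]
        simp
      · rw [getD_set_ne _ _ _ _ _ hj, hget]
        by_cases h1 : j < m
        · have h2 : j < m + 1 := by omega
          simp [h1, h2]
        · have h2 : ¬ j < m + 1 := by omega
          simp [h1, h2]

-- pointwise description of the per-share double loop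
theorem stepShare_spec (N : Nat) (s : List (List Int)) :
    ∀ (m : Nat) (z : List (List Int)), m ≤ z.length →
      (((List.range m).foldl (fun z l => (List.range N).foldl (fun z i =>
          z.set l ((z.getD l []).set i
            ((z.getD l []).getD i 0 + ((s.getD l []).getD i 0)))) z) z).length = z.length) ∧
      (∀ l : Nat, ((List.range m).foldl (fun z l => (List.range N).foldl (fun z i =>
          z.set l ((z.getD l []).set i
            ((z.getD l []).getD i 0 + ((s.getD l []).getD i 0)))) z) z).getD l []
        = if l < m then
            (List.range N).foldl (fun r i => r.set i (r.getD i 0 + ((s.getD l []).getD i 0))) (z.getD l [])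
          else z.getD l []) := by
  intro m
  induction m with
  | zero => intro z _; simp
  | succ m ih =>
    intro z hm
    have hm' : m ≤ z.length := by omega
    obtain ⟨hlen, hget⟩ := ih z hm'
    rw [List.range_succ, List.foldl_append]
    simp only [List.foldl_cons, List.foldl_nil]
    rw [foldl_set_factor m (fun r i => r.set i (r.getD i 0 + ((s.getD m []).getD i 0)))
          (List.range N) _ (by rw [hlen]; omega)]
    constructor
    · rw [List.length_set]; exact hlen
    · intro l
      by_cases hl : l = m
      · subst hl
        rw [getD_set_self _ _ _ _ (by rw [hlen]; omega), hget]
        simp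
      · rw [getD_set_ne _ _ _ _ _ hl, hget]
        by_cases h1 : l < m
        · have h2 : l < m + 1 := by omega
          simp [h1, h2]
        · have h2 : ¬ l < m + 1 := by omega
          simp [h1, h2]

-- pointwise description of the whole accumulation over the shares
theorem shares_spec (L N : Nat) :
    ∀ (ss : List (List (List Int))) (z : List (List Int)),
      z.length = L → (∀ l : Nat, l < L → (z.getD l []).length = N) →
      (∀ s ∈ ss, L ≤ s.length ∧ ∀ l : Nat, l < L → N ≤ ((s.getD l []).length)) →
      ((ss.foldl (fun z_sum z_share =>
          (List.range L).foldl (fun z_sum l => (List.range N).foldl (fun z_sum i =>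
            z_sum.set l ((z_sum.getD l []).set i
              ((z_sum.getD l []).getD i 0 + ((z_share.getD l []).getD i 0)))) z_sum) z_sum) z).length = L) ∧
      (∀ l : Nat, l < L → ((ss.foldl (fun z_sum z_share =>
          (List.range L).foldl (fun z_sum l => (List.range N).foldl (fun z_sum i =>
            z_sum.set l ((z_sum.getD l []).set i
              ((z_sum.getD l []).getD i 0 + ((z_share.getD l []).getD i 0)))) z_sum) z_sum) z).getD l []).length = N ∧
        ∀ j : Nat, j < N → (((ss.foldl (fun z_sum z_share =>
          (List.range L).foldl (fun z_sum l => (List.range N).foldl (fun z_sum i =>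
            z_sum.set l ((z_sum.getD l []).set i
              ((z_sum.getD l []).getD i 0 + ((z_share.getD l []).getD i 0)))) z_sum) z_sum) z).getD l []).getD j 0)
          = (z.getD l []).getD j 0 + psum l j ss) := by
  intro ss
  induction ss with
  | nil =>
    intro z hz hrow _
    refine ⟨hz, fun l hl => ⟨hrow l hl, fun j _ => ?_⟩⟩
    simp [psum]
  | cons s ss ih =>
    intro z hz hrow hs
    simp only [List.foldl_cons]
    have hsL : L ≤ s.length := (hs s (by simp)).1
    obtain ⟨hlen1, hget1⟩ := stepShare_spec N s L z (by omega)
    set z' := (List.range L).foldl (fun z l => (List.range N).foldl (fun z i =>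
      z.set l ((z.getD l []).set i
        ((z.getD l []).getD i 0 + ((s.getD l []).getD i 0)))) z) z with hz'
    have hz'len : z'.length = L := by rw [hlen1, hz]
    have hz'row : ∀ l : Nat, l < L → (z'.getD l []).length = N := by
      intro l hl
      rw [hget1 l]
      simp only [hl, if_pos]
      rw [(rowStep_spec _ N (z.getD l []) (by rw [hrow l hl])).1]
      exact hrow l hl
    have hz'val : ∀ l j : Nat, l < L → j < N →
        (z'.getD l []).getD j 0 = (z.getD l []).getD j 0 + ((s.getD l []).getD j 0) := by
      intro l j hl hj
      rw [hget1 l]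
      simp only [hl, if_pos]
      rw [(rowStep_spec _ N (z.getD l []) (by rw [hrow l hl])).2 j]
      simp [hj]
    obtain ⟨ihlen, ihget⟩ := ih z' hz'len hz'row (fun t ht => hs t (by simp [ht]))
    refine ⟨ihlen, fun l hl => ⟨(ihget l hl).1, fun j hj => ?_⟩⟩
    rw [(ihget l hl).2 j hj, hz'val l j hl hj, psum_cons]
    ring

theorem foldl_const {α β : Type} (is : List β) (z : α) :
    is.foldl (fun z _ => z) z = z := by
  induction is with
  | nil => rfl
  | cons i is ih => simpa using ih

theorem getD_replicate_lt {α : Type} (n i : Nat) (a d : α) (h : i < n) :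
    (List.replicate n a).getD i d = a := by
  rw [List.getD_eq_getElem _ _ (by simpa using h)]
  simp

theorem ext_getD {α : Type} (d : α) (xs ys : List α) (h : xs.length = ys.length)
    (hv : ∀ i : Nat, i < xs.length → xs.getD i d = ys.getD i d) : xs = ys := by
  apply List.ext_getElem h
  intro i h1 h2
  rw [← List.getD_eq_getElem xs d h1, ← List.getD_eq_getElem ys d h2]
  exact hv i h1

-- ===== VERDICT (by name: the statement is the Claim_ definition above) =====
theorem aggregate_responses_spec : Claim_equal_aggregate_responses := by
  intro z_shares _ hpre
  show aggregate_responses z_shares = aggregate_responses_alt z_shares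
  match z_shares with
  | [] => rfl
  | first :: rest =>
    have halt : aggregate_responses_alt (first :: rest)
        = some ((List.range first.length).map (fun l =>
            (List.range (first.headD []).length).map (fun i => psum l i (first :: rest)))) := by
      simp only [aggregate_responses_alt]
      rw [pvAgg_closed _ _ _ (by simp)]
    rcases hpre with h | ⟨hfne, hN0 | hall⟩
    · exact absurd h (by simp)
    · -- N = 0: A never indexes a share and returns L empty rows; B's rows are empty maps
      simp only [List.headD_cons] at hN0
      rw [halt]
      simp only [aggregate_responses, hN0, List.range_zero, List.foldl_nil, List.map_nil]
      simp only [foldl_const, List.replicate_zero]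
      congr 1
      apply ext_getD ([] : List Int)
      · simp
      intro l hl
      simp only [List.length_replicate] at hl
      rw [getD_replicate_lt _ _ _ _ hl,
          List.getD_eq_getElem _ _ (by simpa using hl), List.getElem_map]
    simp only [List.headD_cons] at hfne hall
    have hinitlen : (List.replicate first.length
        (List.replicate (first.headD []).length (0:Int))).length = first.length := by simp
    have hinitrow : ∀ l : Nat, l < first.length →
        ((List.replicate first.length
          (List.replicate (first.headD []).length (0:Int))).getD l []).length
          = (first.headD []).length := by
      intro l hl
      rw [getD_replicate_lt _ _ _ _ hl]
      simp
    obtain ⟨hAlen, hAget⟩ := shares_spec first.length (first.headD []).length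
      (first :: rest) _ hinitlen hinitrow hall
    rw [halt]
    simp only [aggregate_responses]
    congr 1
    apply ext_getD ([] : List Int)
    · rw [List.length_map, List.length_range]; exact hAlen
    intro l hlX
    have hlL : l < first.length := by rw [← hAlen]; exact hlX
    conv_rhs => rw [List.getD_eq_getElem _ _ (by rw [List.length_map, List.length_range]; exact hlL),
        List.getElem_map, List.getElem_range]
    obtain ⟨hrlen, hrval⟩ := hAget l hlL
    apply ext_getD (0 : Int)
    · rw [List.length_map, List.length_range]; exact hrlen
    intro j hjX
    have hjN : j < (first.headD []).length := by rw [← hrlen]; exact hjX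
    conv_rhs => rw [List.getD_eq_getElem _ _ (by rw [List.length_map, List.length_range]; exact hjN),
        List.getElem_map, List.getElem_range]
    rw [hrval j hjN]
    rw [getD_replicate_lt _ _ _ _ hlL, getD_replicate_lt _ _ _ _ hjN]
    simp only [psum, zero_add]
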